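-- pv_equiv track=rewrite | github.com/kazuhiko1979/edabit_2 | 138_very_hard_Diamond_Sum.py | diamond_sum
-- ===== SOURCE A (Python) =====
-- def diamond_sum(n):
--
--     total = 0
--     n_list = [[i + j * n for i in range(1, n + 1)] for j in range(n)]
--
--     # 中央の値を加算
--     total += n_list[0][n // 2]
--     total += n_list[n - 1][n // 2]
--
--     left_side = n // 2
--     right_side = n // 2
--
--     # 左右の対角線の値を加算
--     for row in range(1, n - 1):
--         if row <= n // 2:
--             left_side -= 1
--             right_side += 1
--         else:
--             left_side += 1
--             right_side -= 1
--
--         total += n_list[row][left_side]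
--         total += n_list[row][right_side]
--
--     return total if n > 1 else 1
-- ===== SOURCE B (Python) =====
-- def diamond_sum(n):
--     # Closed form: centre cells of top/bottom rows plus, for each middle row r,
--     # the two diagonal cells, whose values sum to (n + 1) + 2*r*n independently
--     # of their columns; summing that arithmetic series gives an O(1) formula.
--     # A diamond exists only in an odd-sized grid, so validate the input.
--     if n == 1:
--         return 1
--     if n < 1 or n % 2 == 0:
--         raise ValueError("diamond_sum needs an odd grid size")
--     m = n // 2
--     k = n - 2  # number of middle rows
--     return 2 * (m + 1) + (n - 1) * n + k * (n + 1) + n * k * (k + 1)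
-- ===== Notes on version B (the rewrite author's own statement) =====
-- stated objective: alternative
-- what changed: Replaced the O(n^2) matrix construction and row loop with a closed-form arithmetic formula (plus input validation for odd grid sizes).
-- outside the precondition, e.g. on diamond_sum(2): A returns 6, B raises ValueError; on diamond_sum(0): A raises IndexError, B raises ValueError; on diamond_sum(4): A raises IndexError, B raises ValueError
import Mathlib
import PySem

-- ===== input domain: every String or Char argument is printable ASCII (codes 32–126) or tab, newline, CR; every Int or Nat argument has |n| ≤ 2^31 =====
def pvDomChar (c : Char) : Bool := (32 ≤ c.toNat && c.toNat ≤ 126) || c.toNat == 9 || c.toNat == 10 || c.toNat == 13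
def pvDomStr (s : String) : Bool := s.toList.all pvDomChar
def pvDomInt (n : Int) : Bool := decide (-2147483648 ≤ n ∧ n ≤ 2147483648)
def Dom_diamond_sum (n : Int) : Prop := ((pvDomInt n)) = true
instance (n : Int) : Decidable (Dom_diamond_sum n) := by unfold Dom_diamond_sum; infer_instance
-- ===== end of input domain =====

-- B replaces A's matrix build + row loop by a closed-form arithmetic formula over the same inputs.


-- ===== PORT A =====
-- the matrix [[i + j*n for i in range(1, n+1)] for j in range(n)]
def dsMatrix (n : Int) : List (List Int) :=
  (PySem.List.pyRange 0 n 1).map (fun j =>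
    (PySem.List.pyRange 1 (n + 1) 1).map (fun i => i + j * n))

-- one iteration of A's for-loop: state = (total, left_side, right_side)
def dsStep (n m : Int) (nlist : List (List Int)) (st : Int × Int × Int) (row : Int) :
    Int × Int × Int :=
  let ls := if row ≤ m then st.2.1 - 1 else st.2.1 + 1
  let rs := if row ≤ m then st.2.2 + 1 else st.2.2 - 1
  let t := st.1 + PySem.List.pyGetD (PySem.List.pyGetD nlist row []) ls 0
              + PySem.List.pyGetD (PySem.List.pyGetD nlist row []) rs 0
  (t, ls, rs)

def diamond_sum (n : Int) : Int :=
  let nlist := dsMatrix n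
  let m := PySem.Int.floordiv n 2
  let total : Int := 0
  let total := total + PySem.List.pyGetD (PySem.List.pyGetD nlist 0 []) m 0
  let total := total + PySem.List.pyGetD (PySem.List.pyGetD nlist (n - 1) []) m 0
  let st := (PySem.List.pyRange 1 (n - 1) 1).foldl (dsStep n m nlist) (total, m, m)
  if n > 1 then st.1 else 1

-- ===== PORT B =====
def diamond_sum_alt (n : Int) : Int :=
  if n = 1 then 1
  else if n < 1 ∨ PySem.Int.mod n 2 = 0 then 0  -- raise ValueError (unreachable under Pre_)
  else
    let m := PySem.Int.floordiv n 2
    let k := n - 2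
    2 * (m + 1) + (n - 1) * n + k * (n + 1) + n * k * (k + 1)

-- ===== PRECONDITION & SPEC =====
-- Pre_ excludes the inputs where A raises IndexError (n ≤ 0: empty matrix; even n ≥ 4:
-- right_side reaches column n), and the single even size n = 2, the one even grid on which
-- A returns: no diamond exists in an even grid, and B accepts odd sizes only and raises there.
def Pre_diamond_sum (n : Int) : Prop := n = 1 ∨ (3 ≤ n ∧ n % 2 = 1)
instance (n : Int) : Decidable (Pre_diamond_sum n) := by unfold Pre_diamond_sum; infer_instance
def pvWitness_diamond_sum : Int := 5

def Spec_diamond_sum (n : Int) (out : Int) : Prop := out = diamond_sum_alt n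
instance (n : Int) (out : Int) : Decidable (Spec_diamond_sum n out) := by unfold Spec_diamond_sum; infer_instance

-- ===== CLAIM (what is proved, stated in full; the proofs are below) =====
def Claim_equal_diamond_sum : Prop :=
  ∀ (n : Int), Dom_diamond_sum n → Pre_diamond_sum n → Spec_diamond_sum n (diamond_sum n)

-- ===== LEMMAS AND PROOFS =====

-- value of the matrix cell at (row, c)
theorem dsMatrix_cell (n row c : Int) (h0 : 0 ≤ row) (h1 : row < n) (h2 : 0 ≤ c) (h3 : c < n) :
    PySem.List.pyGetD (PySem.List.pyGetD (dsMatrix n) row []) c 0 = c + 1 + row * n := by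
  unfold dsMatrix
  rw [PySem.List.pyGetD_map_pyRange_of_nonneg _ n row [] h0 h1]
  have hc : c = ((c.toNat : Int)) := (Int.toNat_of_nonneg h2).symm
  rw [hc, PySem.List.pyGetD_map_pyRange_one _ 1 (n + 1) c.toNat 0 (by omega)]
  omega

-- loop invariant for A's for-loop on an odd grid of size n ≥ 3
theorem dsLoop (n : Int) (h3 : 3 ≤ n) (hodd : n % 2 = 1) (t0 : Int) :
    ∀ (k : Nat), (k : Int) ≤ n - 2 →
      (PySem.List.pyRange 1 (1 + (k : Int)) 1).foldl
          (dsStep n (PySem.Int.floordiv n 2) (dsMatrix n))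
          (t0, PySem.Int.floordiv n 2, PySem.Int.floordiv n 2) =
        (t0 + (k : Int) * (n + 1) + n * (k : Int) * ((k : Int) + 1),
          if (k : Int) ≤ PySem.Int.floordiv n 2 then PySem.Int.floordiv n 2 - (k : Int)
            else (k : Int) - PySem.Int.floordiv n 2,
          if (k : Int) ≤ PySem.Int.floordiv n 2 then PySem.Int.floordiv n 2 + (k : Int)
            else n - 1 - ((k : Int) - PySem.Int.floordiv n 2)) := by
  have hm : PySem.Int.floordiv n 2 = n / 2 := PySem.Int.floordiv_eq_ediv_of_pos (by omega)
  set m := PySem.Int.floordiv n 2 with hmdef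
  have h2m : 2 * m = n - 1 := by omega
  intro k
  induction k with
  | zero =>
      intro _
      rw [PySem.List.pyRange_one_eq_nil (by omega)]
      simp
      omega
  | succ k ih =>
      intro hk
      have hk' : (k : Int) ≤ n - 2 := by push_cast at hk ⊢; omega
      have hsplit : (((k + 1 : Nat)) : Int) = ((k : Int) + 1) := by push_cast; ring
      rw [hsplit, show (1 : Int) + ((k : Int) + 1) = (1 + (k : Int)) + 1 by ring,
        PySem.List.pyRange_one_succ_right (by omega : (1:Int) ≤ 1 + (k : Int)),
        List.foldl_append, ih hk']
      have hrow : (0 : Int) ≤ 1 + (k : Int) ∧ 1 + (k : Int) < n := by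
        constructor <;> omega
      -- the row index of this iteration is 1 + k = k + 1
      simp only [List.foldl_cons, List.foldl_nil]
      unfold dsStep
      by_cases hcase : (1 + (k : Int)) ≤ m
      · have hls : (if (k : Int) ≤ m then m - (k : Int) else (k : Int) - m) - 1 = m - ((k : Int) + 1) := by
          split_ifs with h <;> omega
        have hrs : (if (k : Int) ≤ m then m + (k : Int) else n - 1 - ((k : Int) - m)) + 1 = m + ((k : Int) + 1) := by
          split_ifs with h <;> omega
        simp only [if_pos hcase, hls, hrs]
        rw [dsMatrix_cell n (1 + (k : Int)) (m - ((k : Int) + 1)) (by omega) (by omega) (by omega) (by omega)]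
        rw [dsMatrix_cell n (1 + (k : Int)) (m + ((k : Int) + 1)) (by omega) (by omega) (by omega) (by omega)]
        have : ((k : Int) + 1) ≤ m := by omega
        rw [if_pos this, if_pos this]
        refine Prod.ext ?_ rfl
        linear_combination h2m
      · have hkm : m ≤ (k : Int) := by omega
        have hls : (if (k : Int) ≤ m then m - (k : Int) else (k : Int) - m) + 1 = ((k : Int) + 1) - m := by
          split_ifs with h <;> omega
        have hrs : (if (k : Int) ≤ m then m + (k : Int) else n - 1 - ((k : Int) - m)) - 1 = n - 1 - (((k : Int) + 1) - m) := by
          split_ifs with h <;> omega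
        simp only [if_neg hcase, hls, hrs]
        rw [dsMatrix_cell n (1 + (k : Int)) (((k : Int) + 1) - m) (by omega) (by omega) (by omega) (by omega)]
        rw [dsMatrix_cell n (1 + (k : Int)) (n - 1 - (((k : Int) + 1) - m)) (by omega) (by omega) (by omega) (by omega)]
        have : ¬ ((k : Int) + 1) ≤ m := by omega
        rw [if_neg this, if_neg this]
        refine Prod.ext ?_ rfl
        ring

-- ===== VERDICT (by name: the statement is the Claim_ definition above) =====
theorem diamond_sum_spec : Claim_equal_diamond_sum := by
  intro n _ hpre
  unfold Spec_diamond_sum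
  rcases hpre with h1 | ⟨h3, hodd⟩
  · subst h1; decide
  · have hm : PySem.Int.floordiv n 2 = n / 2 := PySem.Int.floordiv_eq_ediv_of_pos (by omega)
    have h2m : 2 * (n / 2) = n - 1 := by omega
    unfold diamond_sum
    dsimp only
    have hk : n - 1 = 1 + (((n - 2).toNat : Int)) := by omega
    rw [dsMatrix_cell n 0 (PySem.Int.floordiv n 2) (by omega) (by omega) (by omega) (by omega),
      dsMatrix_cell n (n - 1) (PySem.Int.floordiv n 2) (by omega) (by omega) (by omega) (by omega)]
    rw [hk, dsLoop n h3 hodd _ (n - 2).toNat (by omega)]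
    have hne : ¬ (n = 1) := by omega
    unfold diamond_sum_alt
    have hmod : PySem.Int.mod n 2 = n % 2 := PySem.Int.mod_eq_emod_of_pos (by omega)
    rw [if_neg hne, if_neg (show ¬(n < 1 ∨ PySem.Int.mod n 2 = 0) by rw [hmod]; omega),
      if_pos (by omega : n > 1)]
    simp only [hm]
    have hK : (((n - 2).toNat : Int)) = n - 2 := by omega
    rw [hK]
    ring
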